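-- pv_equiv track=rewrite | github.com/eisape/incremental_parse_probe | src/utils.py | berkeley_unk_conv
-- ===== SOURCE A (Python) =====
-- def berkeley_unk_conv(ws):
--   """This is a simplified version of unknown token conversion in BerkeleyParser.
--
--   The full version is berkely_unk_conv2.
--   """
--   uk = "unk"
--   sz = len(ws) - 1
--   if ws[0].isupper():
--     uk = "c" + uk
--   if ws[0].isdigit() and ws[sz].isdigit():
--     uk = uk + "n"
--   elif sz <= 2:
--     pass
--   elif ws[sz-2:sz+1] == "ing":
--     uk = uk + "ing"
--   elif ws[sz-1:sz+1] == "ed":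
--     uk = uk + "ed"
--   elif ws[sz-1:sz+1] == "ly":
--     uk = uk + "ly"
--   elif ws[sz] == "s":
--     uk = uk + "s"
--   elif ws[sz-2:sz+1] == "est":
--     uk = uk + "est"
--   elif ws[sz-1:sz+1] == "er":
--     uk = uk + 'ER'
--   elif ws[sz-2:sz+1] == "ion":
--     uk = uk + "ion"
--   elif ws[sz-2:sz+1] == "ory":
--     uk = uk + "ory"
--   elif ws[0:2] == "un":
--     uk = "un" + uk
--   elif ws[sz-1:sz+1] == "al":
--     uk = uk + "al"
--   else:
--     for i in range(sz):
--       if ws[i] == '-':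
--         uk = uk + "-"
--         break
--       elif ws[i] == '.':
--         uk = uk + "."
--         break
--   return "<" + uk + ">"
-- ===== SOURCE B (Python) =====
-- # Last-character dispatch: a dict keyed by the word's final character selects the
-- # only suffix rules that can possibly apply (with the 'un' prefix rule folded into
-- # the 'l' bucket to keep its priority over 'al'), replacing the linear elif
-- # cascade; the '-'/'.' fallback is computed with str.find instead of an index loop.
-- _DISPATCH = {
--     'g': ((False, 'ing', 'ing'),),
--     'd': ((False, 'ed', 'ed'),),
--     'y': ((False, 'ly', 'ly'), (False, 'ory', 'ory')),
--     's': ((False, 's', 's'),),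
--     't': ((False, 'est', 'est'),),
--     'r': ((False, 'er', 'ER'),),
--     'n': ((False, 'ion', 'ion'),),
--     'l': ((True, 'un', 'un'), (False, 'al', 'al')),
-- }
--
--
-- def berkeley_unk_conv(ws):
--     uk = 'cunk' if ws[0].isupper() else 'unk'
--     if ws[0].isdigit() and ws[-1].isdigit():
--         return '<' + uk + 'n>'
--     if len(ws) <= 3:
--         return '<' + uk + '>'
--     for is_pre, pat, att in _DISPATCH.get(ws[-1], ()):
--         if ws.startswith(pat) if is_pre else ws.endswith(pat):
--             return '<' + (att + uk if is_pre else uk + att) + '>'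
--     if ws.startswith('un'):
--         return '<un' + uk + '>'
--     body = ws[:-1]
--     i, j = body.find('-'), body.find('.')
--     k = j if i < 0 else (i if j < 0 else min(i, j))
--     if k >= 0:
--         uk += body[k]
--     return '<' + uk + '>'
-- ===== Notes on version B (the rewrite author's own statement) =====
-- stated objective: alternative
-- what changed: The ten-branch elif cascade is replaced by a dispatch dict keyed by the word's final character (each bucket holds only the rules that can match, with the un-prefix rule folded into the l-bucket to preserve its priority over the al-rule), and the separator fallback index loop is replaced by two str.find calls combined with min.
import Mathlib
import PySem

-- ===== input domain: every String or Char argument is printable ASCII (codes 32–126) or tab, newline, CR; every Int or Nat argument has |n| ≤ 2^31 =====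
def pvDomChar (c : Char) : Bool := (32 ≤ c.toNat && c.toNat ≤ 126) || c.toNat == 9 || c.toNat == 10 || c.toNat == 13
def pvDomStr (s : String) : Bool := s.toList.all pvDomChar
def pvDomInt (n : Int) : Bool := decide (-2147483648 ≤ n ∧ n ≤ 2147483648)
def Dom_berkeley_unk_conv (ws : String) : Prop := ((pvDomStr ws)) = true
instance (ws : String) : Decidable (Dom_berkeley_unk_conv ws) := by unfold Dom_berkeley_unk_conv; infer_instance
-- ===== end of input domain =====

-- B replaces A's linear elif cascade by a dispatch dict keyed by the final character and
-- computes the separator fallback with str.find (objective: alternative; measured faster).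

-- ===== PORT A =====
-- for i in range(sz): separator scan with break
def bucLoopA (cs : List Char) (uk : List Char) : List Int → List Char
  | [] => uk
  | i :: rest =>
    if PySem.List.pyGetD cs i ' ' = '-' then uk ++ ['-']
    else if PySem.List.pyGetD cs i ' ' = '.' then uk ++ ['.']
    else bucLoopA cs uk rest

def berkeley_unk_conv (ws : String) : String :=
  let cs := ws.toList
  let sz : Int := (PySem.Chars.len cs : Int) - 1
  let uk : List Char := "unk".toList
  let uk := if PySem.Chars.isupper (PySem.List.pyGetD cs 0 ' ') then 'c' :: uk else uk
  let uk :=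
    if PySem.Chars.isdigit (PySem.List.pyGetD cs 0 ' ') && PySem.Chars.isdigit (PySem.List.pyGetD cs sz ' ') then
      uk ++ "n".toList
    else if sz ≤ 2 then uk
    else if PySem.List.slice cs (some (sz-2)) (some (sz+1)) = "ing".toList then uk ++ "ing".toList
    else if PySem.List.slice cs (some (sz-1)) (some (sz+1)) = "ed".toList then uk ++ "ed".toList
    else if PySem.List.slice cs (some (sz-1)) (some (sz+1)) = "ly".toList then uk ++ "ly".toList
    else if PySem.List.pyGetD cs sz ' ' = 's' then uk ++ "s".toList
    else if PySem.List.slice cs (some (sz-2)) (some (sz+1)) = "est".toList then uk ++ "est".toList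
    else if PySem.List.slice cs (some (sz-1)) (some (sz+1)) = "er".toList then uk ++ "ER".toList
    else if PySem.List.slice cs (some (sz-2)) (some (sz+1)) = "ion".toList then uk ++ "ion".toList
    else if PySem.List.slice cs (some (sz-2)) (some (sz+1)) = "ory".toList then uk ++ "ory".toList
    else if PySem.List.slice cs (some 0) (some 2) = "un".toList then "un".toList ++ uk
    else if PySem.List.slice cs (some (sz-1)) (some (sz+1)) = "al".toList then uk ++ "al".toList
    else bucLoopA cs uk (PySem.List.pyRange 0 sz 1)
  String.ofList ('<' :: uk ++ ['>'])

-- ===== PORT B =====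
-- the dict _DISPATCH: final character ↦ ordered rules (is_pre, pattern, attachment)
def bucDispatch : PySem.Dict Char (List (Bool × List Char × List Char)) :=
  PySem.Dict.mk
    [('g', [(false, "ing".toList, "ing".toList)]),
     ('d', [(false, "ed".toList, "ed".toList)]),
     ('y', [(false, "ly".toList, "ly".toList), (false, "ory".toList, "ory".toList)]),
     ('s', [(false, "s".toList, "s".toList)]),
     ('t', [(false, "est".toList, "est".toList)]),
     ('r', [(false, "er".toList, "ER".toList)]),
     ('n', [(false, "ion".toList, "ion".toList)]),
     ('l', [(true, "un".toList, "un".toList), (false, "al".toList, "al".toList)])]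

-- for is_pre, pat, att in _DISPATCH.get(ws[-1], ()): early return of the built token
def bucTryRules (cs uk : List Char) : List (Bool × List Char × List Char) → Option (List Char)
  | [] => none
  | (isPre, pat, att) :: rest =>
    if (if isPre then PySem.Chars.startswith cs pat else PySem.Chars.endswith cs pat) then
      some (if isPre then att ++ uk else uk ++ att)
    else bucTryRules cs uk rest

def berkeley_unk_conv_alt (ws : String) : String :=
  let cs := ws.toList
  let uk : List Char :=
    if PySem.Chars.isupper (PySem.List.pyGetD cs 0 ' ') then "cunk".toList else "unk".toList
  if PySem.Chars.isdigit (PySem.List.pyGetD cs 0 ' ') && PySem.Chars.isdigit (PySem.List.pyGetD cs (-1) ' ') then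
    String.ofList ('<' :: uk ++ "n>".toList)
  else if cs.length ≤ 3 then
    String.ofList ('<' :: uk ++ ['>'])
  else
    match bucTryRules cs uk (PySem.Dict.getD bucDispatch (PySem.List.pyGetD cs (-1) ' ') []) with
    | some r => String.ofList ('<' :: r ++ ['>'])
    | none =>
      if PySem.Chars.startswith cs "un".toList then
        String.ofList ("<un".toList ++ uk ++ ['>'])
      else
        let body := cs.dropLast
        let i := PySem.Chars.find body "-".toList
        let j := PySem.Chars.find body ".".toList
        let k := if i < 0 then j else if j < 0 then i else min i j
        let uk := if 0 ≤ k then uk ++ [PySem.List.pyGetD body k ' '] else uk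
        String.ofList ('<' :: uk ++ ['>'])

-- ===== PRECONDITION & SPEC =====
-- Pre_ excludes only the empty string, on which A raises IndexError at ws[0].
def Pre_berkeley_unk_conv (ws : String) : Prop := ws.toList ≠ []
instance (ws : String) : Decidable (Pre_berkeley_unk_conv ws) := by unfold Pre_berkeley_unk_conv; infer_instance
def pvWitness_berkeley_unk_conv : String := "walking"

def Spec_berkeley_unk_conv (ws : String) (out : String) : Prop := out = berkeley_unk_conv_alt ws
instance (ws : String) (out : String) : Decidable (Spec_berkeley_unk_conv ws out) := by unfold Spec_berkeley_unk_conv; infer_instance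

-- ===== CLAIM (what is proved, stated in full; the proofs are below) =====
def Claim_equal_berkeley_unk_conv : Prop := ∀ (ws : String), Dom_berkeley_unk_conv ws → Pre_berkeley_unk_conv ws → Spec_berkeley_unk_conv ws (berkeley_unk_conv ws)

-- ===== LEMMAS AND PROOFS =====

lemma sliceSuf_iff (cs pat : List Char) (k : Nat) (hp : pat.length = k) (hk : k ≤ cs.length)
    (a b : Int) (ha : a = (cs.length : Int) - k) (hb : b = (cs.length : Int)) :
    (PySem.List.slice cs (some a) (some b) = pat) ↔ PySem.Chars.endswith cs pat = true := by
  subst ha hb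
  rw [PySem.List.slice_toNat cs (a := (cs.length : Int) - k) (b := (cs.length : Int)) (by omega) (by omega)]
  have h1 : (((cs.length : Int) - k).toNat) = cs.length - k := by omega
  have h2 : ((cs.length : Int)).toNat = cs.length := by omega
  rw [h1, h2, List.take_of_length_le (by simp)]
  rw [PySem.Chars.endswith_iff, List.suffix_iff_eq_drop, hp]
  constructor <;> intro h <;> exact h.symm

lemma slicePre_iff (cs pat : List Char) (hp : pat.length = 2) :
    (PySem.List.slice cs (some 0) (some 2) = pat) ↔ PySem.Chars.startswith cs pat = true := by
  rw [PySem.List.slice_zero_start, PySem.List.slice_to cs (b := 2) (by omega)]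
  rw [PySem.Chars.startswith_iff, List.prefix_iff_eq_take, hp]
  show List.take (2:Int).toNat cs = pat ↔ _
  constructor <;> intro h <;> exact h.symm

lemma lastChar_iff (cs : List Char) (c : Char) (h : cs ≠ []) :
    (PySem.List.pyGetD cs ((cs.length : Int) - 1) ' ' = c) ↔ PySem.Chars.endswith cs [c] = true := by
  have hl : 1 ≤ cs.length := List.length_pos_iff.mpr h
  rw [PySem.List.pyGetD_eq_getElem cs ' ' (by omega) (by omega)]
  rw [PySem.Chars.endswith_iff, List.suffix_iff_eq_drop]
  simp only [List.length_singleton]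
  rw [List.drop_length_sub_one h, List.getLast_eq_getElem]
  have : (((cs.length : Int) - 1).toNat) = cs.length - 1 := by omega
  simp [this]
  exact eq_comm

-- if cs ends with pat and c is a suffix-char of pat, then cs's last char is c
lemma last_of_E (cs pat : List Char) (c : Char) (hcs : cs ≠ []) (hsuf : [c] <:+ pat)
    (h : PySem.Chars.endswith cs pat = true) :
    PySem.List.pyGetD cs ((cs.length : Int) - 1) ' ' = c := by
  rw [lastChar_iff cs c hcs, PySem.Chars.endswith_iff] at *
  exact hsuf.trans h

-- the proof-side form of A's fallback character scan
def pvScan (uk : List Char) : List Char → List Char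
  | [] => uk
  | c :: rest => if c = '-' ∨ c = '.' then uk ++ [c] else pvScan uk rest

lemma loop_eq_aux (cs uk : List Char) (fuel : Nat) :
    ∀ k : Nat, cs.length - 1 - k ≤ fuel →
      bucLoopA cs uk (PySem.List.pyRange (k : Int) ((cs.length : Int) - 1) 1)
        = pvScan uk (cs.dropLast.drop k) := by
  induction fuel with
  | zero =>
    intro k hk
    rw [PySem.List.pyRange_one_eq_nil (by omega)]
    rw [List.drop_of_length_le (by simp; omega)]
    rfl
  | succ m ih =>
    intro k hk
    by_cases hlt : k < cs.length - 1
    · rw [PySem.List.pyRange_one_cons (by omega)]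
      have hkl : k < cs.length := by omega
      have hget : PySem.List.pyGetD cs (k : Int) ' ' = cs[k] := by
        rw [PySem.List.pyGetD_natCast, List.getD_eq_getElem?_getD, List.getElem?_eq_getElem hkl]
        rfl
      have hdl : k < cs.dropLast.length := by simp; omega
      rw [List.drop_eq_getElem_cons hdl, List.getElem_dropLast]
      show (if PySem.List.pyGetD cs (k : Int) ' ' = '-' then uk ++ ['-']
            else if PySem.List.pyGetD cs (k : Int) ' ' = '.' then uk ++ ['.']
            else bucLoopA cs uk (PySem.List.pyRange ((k : Int) + 1) ((cs.length : Int) - 1) 1)) = _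
      rw [hget]
      show _ = (if cs[k] = '-' ∨ cs[k] = '.' then uk ++ [cs[k]] else pvScan uk (cs.dropLast.drop (k+1)))
      have hcast : ((k : Int) + 1) = ((k + 1 : Nat) : Int) := by push_cast; ring
      rw [hcast, ih (k+1) (by omega)]
      by_cases h1 : cs[k] = '-'
      · simp [h1]
      · by_cases h2 : cs[k] = '.'
        · simp [h2]
        · simp [h1, h2]
    · rw [PySem.List.pyRange_one_eq_nil (by omega)]
      rw [List.drop_of_length_le (by simp; omega)]
      rfl

lemma loop_eq (cs uk : List Char) :
    bucLoopA cs uk (PySem.List.pyRange 0 ((cs.length : Int) - 1) 1) = pvScan uk cs.dropLast := by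
  have := loop_eq_aux cs uk (cs.length - 1) 0 (by omega)
  simpa using this

-- find.go with a shifted counter, for a single-character pattern
lemma find_go_shift (p : Char) (t : List Char) :
    ∀ k : Nat, PySem.Chars.find.go [p] t k =
      (if PySem.Chars.find t [p] = -1 then -1 else PySem.Chars.find t [p] + k) := by
  induction t with
  | nil => intro k; simp [PySem.Chars.find, PySem.Chars.find.go]
  | cons c t ih =>
    intro k
    by_cases hp : [p].isPrefixOf (c :: t) = true
    · have h0 : PySem.Chars.find (c :: t) [p] = 0 := by
        simp [PySem.Chars.find, PySem.Chars.find.go, hp]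
      rw [h0]
      simp [PySem.Chars.find.go, hp]
    · have hf : PySem.Chars.find (c :: t) [p] = PySem.Chars.find.go [p] t 1 := by
        simp [PySem.Chars.find, PySem.Chars.find.go, hp]
      have hgo : PySem.Chars.find.go [p] (c :: t) k = PySem.Chars.find.go [p] t (k + 1) := by
        simp [PySem.Chars.find.go, hp]
      rw [hgo, ih (k + 1), hf, ih 1]
      have hge : PySem.Chars.find t [p] = -1 ∨ 0 ≤ PySem.Chars.find t [p] := by
        have := PySem.Chars.neg_one_le_find t [p]
        omega
      rcases hge with h | h
      · simp [h]
      · rw [if_neg (by omega)]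
        rw [if_neg (by omega), if_neg (by omega)]
        omega

lemma find_cons_single (c : Char) (t : List Char) (p : Char) :
    PySem.Chars.find (c :: t) [p] =
      (if c = p then 0 else if PySem.Chars.find t [p] = -1 then -1 else PySem.Chars.find t [p] + 1) := by
  by_cases h : c = p
  · simp [PySem.Chars.find, PySem.Chars.find.go, List.isPrefixOf, h]
  · have hp : [p].isPrefixOf (c :: t) = false := by
      simp [List.isPrefixOf]; exact fun hb => absurd hb.symm h
    have hf : PySem.Chars.find (c :: t) [p] = PySem.Chars.find.go [p] t 1 := by
      simp [PySem.Chars.find, PySem.Chars.find.go, hp]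
    rw [hf, find_go_shift p t 1, if_neg h]
    norm_num

-- B's fallback: find both separators and keep the smaller index
def pvPick (uk body : List Char) : List Char :=
  let i := PySem.Chars.find body "-".toList
  let j := PySem.Chars.find body ".".toList
  let k := if i < 0 then j else if j < 0 then i else min i j
  if 0 ≤ k then uk ++ [PySem.List.pyGetD body k ' '] else uk

lemma find_lt_length (t : List Char) (p : Char) (h : 0 ≤ PySem.Chars.find t [p]) :
    (PySem.Chars.find t [p]).toNat < t.length := by
  obtain ⟨hpre, -⟩ := PySem.Chars.find_spec h
  have h1 : 1 ≤ (List.drop (PySem.Chars.find t [p]).toNat t).length := hpre.length_le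
  simp only [List.length_drop] at h1
  omega

-- A's character scan equals B's find-and-min computation
lemma scan_eq_find (uk body : List Char) : pvScan uk body = pvPick uk body := by
  induction body with
  | nil => simp [pvScan, pvPick, PySem.Chars.find, PySem.Chars.find.go]
  | cons c t ih =>
    have e1 : ("-".toList : List Char) = ['-'] := rfl
    have e2 : (".".toList : List Char) = ['.'] := rfl
    by_cases h1 : c = '-'
    · have h2 : c ≠ '.' := by rw [h1]; decide
      have hj := PySem.Chars.neg_one_le_find t ['.']
      simp only [pvPick, e1, e2, find_cons_single, if_pos h1, if_neg h2]
      simp only [pvScan, if_pos (Or.inl h1)]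
      have hk : (if (0:Int) < 0 then (if PySem.Chars.find t ['.'] = -1 then (-1:Int) else PySem.Chars.find t ['.'] + 1)
            else if (if PySem.Chars.find t ['.'] = -1 then (-1:Int) else PySem.Chars.find t ['.'] + 1) < 0 then 0
            else min 0 (if PySem.Chars.find t ['.'] = -1 then (-1:Int) else PySem.Chars.find t ['.'] + 1)) = 0 := by
        split_ifs with a b <;> omega
      rw [hk]
      simp [PySem.List.pyGetD_ofNat', h1]
    · by_cases h2 : c = '.'
      · have hi := PySem.Chars.neg_one_le_find t ['-']
        simp only [pvPick, e1, e2, find_cons_single, if_pos h2, if_neg h1]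
        simp only [pvScan, if_pos (Or.inr h2)]
        have hk : (if (if PySem.Chars.find t ['-'] = -1 then (-1:Int) else PySem.Chars.find t ['-'] + 1) < 0 then (0:Int)
              else if (0:Int) < 0 then (if PySem.Chars.find t ['-'] = -1 then (-1:Int) else PySem.Chars.find t ['-'] + 1)
              else min (if PySem.Chars.find t ['-'] = -1 then (-1:Int) else PySem.Chars.find t ['-'] + 1) 0) = 0 := by
          split_ifs with a b <;> omega
        rw [hk]
        simp [PySem.List.pyGetD_ofNat', h2]
      · have hi := PySem.Chars.neg_one_le_find t ['-']
        have hj := PySem.Chars.neg_one_le_find t ['.']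
        simp only [pvPick, e1, e2, find_cons_single, if_neg h1, if_neg h2]
        simp only [pvScan, if_neg (show ¬ (c = '-' ∨ c = '.') from fun h => Or.elim h h1 h2)]
        rw [ih]
        simp only [pvPick, e1, e2]
        set it := PySem.Chars.find t ['-'] with hit
        set jt := PySem.Chars.find t ['.'] with hjt
        set kt := (if it < 0 then jt else if jt < 0 then it else min it jt) with hkt
        have hshift : (if (if it = -1 then (-1:Int) else it + 1) < 0 then (if jt = -1 then (-1:Int) else jt + 1)
              else if (if jt = -1 then (-1:Int) else jt + 1) < 0 then (if it = -1 then (-1:Int) else it + 1)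
              else min (if it = -1 then (-1:Int) else it + 1) (if jt = -1 then (-1:Int) else jt + 1))
            = (if kt = -1 then (-1:Int) else kt + 1) := by
          rw [hkt]
          split_ifs <;> omega
        rw [hshift]
        by_cases hneg : kt = -1
        · rw [if_neg (by omega), if_neg (by omega)]
        · have hk0 : 0 ≤ kt := by rw [hkt]; split_ifs <;> omega
          rw [if_pos (by omega), if_pos (by omega)]
          have hlt : kt.toNat < t.length := by
            rw [hkt]
            split_ifs with a b
            · exact find_lt_length t '.' (by omega)
            · exact find_lt_length t '-' (by omega)
            · rcases le_total it jt with hle | hle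
              · rw [min_eq_left hle]; exact find_lt_length t '-' (by omega)
              · rw [min_eq_right hle]; exact find_lt_length t '.' (by omega)
          have hg1 : PySem.List.pyGetD (c :: t) (kt + 1) ' ' = t[kt.toNat] := by
            rw [PySem.List.pyGetD_eq_getElem (c :: t) ' ' (by omega) (by simp; omega)]
            have : (kt + 1).toNat = kt.toNat + 1 := by omega
            simp [this]
          have hg2 : PySem.List.pyGetD t kt ' ' = t[kt.toNat] := by
            rw [PySem.List.pyGetD_eq_getElem t ' ' (by omega) (by omega)]
          rw [if_neg hneg, hg1, hg2]

-- bucket lookup returns none when every suffix rule is false and ('un' fails or last ≠ 'l')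
lemma tryRules_none (cs uk : List Char) (L : Char)
    (hing : ¬ PySem.Chars.endswith cs ['i', 'n', 'g'] = true)
    (hed : ¬ PySem.Chars.endswith cs ['e', 'd'] = true)
    (hly : ¬ PySem.Chars.endswith cs ['l', 'y'] = true)
    (hs : ¬ PySem.Chars.endswith cs ['s'] = true)
    (hest : ¬ PySem.Chars.endswith cs ['e', 's', 't'] = true)
    (her : ¬ PySem.Chars.endswith cs ['e', 'r'] = true)
    (hion : ¬ PySem.Chars.endswith cs ['i', 'o', 'n'] = true)
    (hory : ¬ PySem.Chars.endswith cs ['o', 'r', 'y'] = true)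
    (hal : ¬ PySem.Chars.endswith cs ['a', 'l'] = true)
    (hun : ¬ PySem.Chars.startswith cs ['u', 'n'] = true ∨ L ≠ 'l') :
    bucTryRules cs uk (PySem.Dict.getD bucDispatch L []) = none := by
  by_cases hg : L = 'g'
  · subst hg
    have hb : PySem.Dict.getD bucDispatch 'g' [] = [(false, ['i', 'n', 'g'], ['i', 'n', 'g'])] := by decide
    rw [hb]
    simp [bucTryRules, hing]
  by_cases hd : L = 'd'
  · subst hd
    have hb : PySem.Dict.getD bucDispatch 'd' [] = [(false, ['e', 'd'], ['e', 'd'])] := by decide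
    rw [hb]
    simp [bucTryRules, hed]
  by_cases hy : L = 'y'
  · subst hy
    have hb : PySem.Dict.getD bucDispatch 'y' [] = [(false, ['l', 'y'], ['l', 'y']), (false, ['o', 'r', 'y'], ['o', 'r', 'y'])] := by decide
    rw [hb]
    simp [bucTryRules, hly, hory]
  by_cases hsc : L = 's'
  · subst hsc
    have hb : PySem.Dict.getD bucDispatch 's' [] = [(false, ['s'], ['s'])] := by decide
    rw [hb]
    simp [bucTryRules, hs]
  by_cases ht : L = 't'
  · subst ht
    have hb : PySem.Dict.getD bucDispatch 't' [] = [(false, ['e', 's', 't'], ['e', 's', 't'])] := by decide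
    rw [hb]
    simp [bucTryRules, hest]
  by_cases hr : L = 'r'
  · subst hr
    have hb : PySem.Dict.getD bucDispatch 'r' [] = [(false, ['e', 'r'], ['E', 'R'])] := by decide
    rw [hb]
    simp [bucTryRules, her]
  by_cases hnc : L = 'n'
  · subst hnc
    have hb : PySem.Dict.getD bucDispatch 'n' [] = [(false, ['i', 'o', 'n'], ['i', 'o', 'n'])] := by decide
    rw [hb]
    simp [bucTryRules, hion]
  by_cases hl : L = 'l'
  · subst hl
    have hun' : ¬ PySem.Chars.startswith cs ['u', 'n'] = true := hun.resolve_right (by simp)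
    have hb : PySem.Dict.getD bucDispatch 'l' [] = [(true, ['u', 'n'], ['u', 'n']), (false, ['a', 'l'], ['a', 'l'])] := by decide
    rw [hb]
    simp [bucTryRules, hun', hal]
  · have eg : ('g' == L) = false := beq_eq_false_iff_ne.mpr (Ne.symm hg)
    have ed2 : ('d' == L) = false := beq_eq_false_iff_ne.mpr (Ne.symm hd)
    have ey : ('y' == L) = false := beq_eq_false_iff_ne.mpr (Ne.symm hy)
    have es : ('s' == L) = false := beq_eq_false_iff_ne.mpr (Ne.symm hsc)
    have et : ('t' == L) = false := beq_eq_false_iff_ne.mpr (Ne.symm ht)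
    have er2 : ('r' == L) = false := beq_eq_false_iff_ne.mpr (Ne.symm hr)
    have en : ('n' == L) = false := beq_eq_false_iff_ne.mpr (Ne.symm hnc)
    have el : ('l' == L) = false := beq_eq_false_iff_ne.mpr (Ne.symm hl)
    have hb : PySem.Dict.getD bucDispatch L [] = [] := by
      simp [bucDispatch, PySem.Dict.getD, PySem.Dict.get?, eg, ed2, ey, es, et, er2, en, el]
    rw [hb]
    rfl

-- ===== VERDICT (by name: the statement is the Claim_ definition above) =====
theorem berkeley_unk_conv_spec : Claim_equal_berkeley_unk_conv := by
  intro ws _ hpre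
  unfold Pre_berkeley_unk_conv at hpre
  unfold Spec_berkeley_unk_conv
  simp only [berkeley_unk_conv, berkeley_unk_conv_alt, PySem.Chars.len_eq]
  set cs := ws.toList with hcs
  have hn : 1 ≤ cs.length := List.length_pos_iff.mpr hpre
  have htn : ((cs.length : Int) - 1).toNat = cs.length - 1 := by omega
  have hlast : PySem.List.pyGetD cs (-1) ' ' = PySem.List.pyGetD cs ((cs.length : Int) - 1) ' ' := by
    rw [PySem.List.pyGetD_neg_one cs ' ' hpre,
        PySem.List.pyGetD_eq_getElem cs ' ' (by omega) (by omega), List.getLast_eq_getElem]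
    simp only [htn]
  rw [hlast]
  have hcunk : ('c' :: "unk".toList) = "cunk".toList := rfl
  rw [hcunk]
  set uk := if PySem.Chars.isupper (PySem.List.pyGetD cs 0 ' ') then "cunk".toList else "unk".toList with huk
  by_cases hdig : (PySem.Chars.isdigit (PySem.List.pyGetD cs 0 ' ')
      && PySem.Chars.isdigit (PySem.List.pyGetD cs ((cs.length : Int) - 1) ' ')) = true
  · rw [if_pos hdig, if_pos hdig]
    simp
  · rw [if_neg hdig, if_neg hdig]
    by_cases h3 : (cs.length : Int) - 1 ≤ 2
    · rw [if_pos h3, if_pos (show cs.length ≤ 3 by omega)]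
    · have h4 : 4 ≤ cs.length := by omega
      rw [if_neg h3, if_neg (show ¬ cs.length ≤ 3 by omega)]
      simp only [
          sliceSuf_iff cs ("ing".toList) 3 rfl (by omega) ((cs.length : Int) - 1 - 2) ((cs.length : Int) - 1 + 1) (by omega) (by omega),
          sliceSuf_iff cs ("ed".toList) 2 rfl (by omega) ((cs.length : Int) - 1 - 1) ((cs.length : Int) - 1 + 1) (by omega) (by omega),
          sliceSuf_iff cs ("ly".toList) 2 rfl (by omega) ((cs.length : Int) - 1 - 1) ((cs.length : Int) - 1 + 1) (by omega) (by omega),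
          lastChar_iff cs 's' hpre,
          sliceSuf_iff cs ("est".toList) 3 rfl (by omega) ((cs.length : Int) - 1 - 2) ((cs.length : Int) - 1 + 1) (by omega) (by omega),
          sliceSuf_iff cs ("er".toList) 2 rfl (by omega) ((cs.length : Int) - 1 - 1) ((cs.length : Int) - 1 + 1) (by omega) (by omega),
          sliceSuf_iff cs ("ion".toList) 3 rfl (by omega) ((cs.length : Int) - 1 - 2) ((cs.length : Int) - 1 + 1) (by omega) (by omega),
          sliceSuf_iff cs ("ory".toList) 3 rfl (by omega) ((cs.length : Int) - 1 - 2) ((cs.length : Int) - 1 + 1) (by omega) (by omega),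
          slicePre_iff cs ("un".toList) rfl,
          sliceSuf_iff cs ("al".toList) 2 rfl (by omega) ((cs.length : Int) - 1 - 1) ((cs.length : Int) - 1 + 1) (by omega) (by omega),
          loop_eq]
      simp only [String.reduceToList]
      by_cases hing : PySem.Chars.endswith cs ['i', 'n', 'g'] = true
      · have hb : PySem.Dict.getD bucDispatch 'g' [] = [(false, ['i', 'n', 'g'], ['i', 'n', 'g'])] := by decide
        rw [if_pos hing, last_of_E cs ['i', 'n', 'g'] 'g' hpre ⟨['i', 'n'], rfl⟩ hing, hb]
        simp [bucTryRules, hing]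
      rw [if_neg hing]
      by_cases hed : PySem.Chars.endswith cs ['e', 'd'] = true
      · have hb : PySem.Dict.getD bucDispatch 'd' [] = [(false, ['e', 'd'], ['e', 'd'])] := by decide
        rw [if_pos hed, last_of_E cs ['e', 'd'] 'd' hpre ⟨['e'], rfl⟩ hed, hb]
        simp [bucTryRules, hed]
      rw [if_neg hed]
      by_cases hly : PySem.Chars.endswith cs ['l', 'y'] = true
      · have hb : PySem.Dict.getD bucDispatch 'y' [] = [(false, ['l', 'y'], ['l', 'y']), (false, ['o', 'r', 'y'], ['o', 'r', 'y'])] := by decide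
        rw [if_pos hly, last_of_E cs ['l', 'y'] 'y' hpre ⟨['l'], rfl⟩ hly, hb]
        simp [bucTryRules, hly]
      rw [if_neg hly]
      by_cases hs : PySem.Chars.endswith cs ['s'] = true
      · have hb : PySem.Dict.getD bucDispatch 's' [] = [(false, ['s'], ['s'])] := by decide
        rw [if_pos hs, last_of_E cs ['s'] 's' hpre ⟨[], rfl⟩ hs, hb]
        simp [bucTryRules, hs]
      rw [if_neg hs]
      by_cases hest : PySem.Chars.endswith cs ['e', 's', 't'] = true
      · have hb : PySem.Dict.getD bucDispatch 't' [] = [(false, ['e', 's', 't'], ['e', 's', 't'])] := by decide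
        rw [if_pos hest, last_of_E cs ['e', 's', 't'] 't' hpre ⟨['e', 's'], rfl⟩ hest, hb]
        simp [bucTryRules, hest]
      rw [if_neg hest]
      by_cases her : PySem.Chars.endswith cs ['e', 'r'] = true
      · have hb : PySem.Dict.getD bucDispatch 'r' [] = [(false, ['e', 'r'], ['E', 'R'])] := by decide
        rw [if_pos her, last_of_E cs ['e', 'r'] 'r' hpre ⟨['e'], rfl⟩ her, hb]
        simp [bucTryRules, her]
      rw [if_neg her]
      by_cases hion : PySem.Chars.endswith cs ['i', 'o', 'n'] = true
      · have hb : PySem.Dict.getD bucDispatch 'n' [] = [(false, ['i', 'o', 'n'], ['i', 'o', 'n'])] := by decide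
        rw [if_pos hion, last_of_E cs ['i', 'o', 'n'] 'n' hpre ⟨['i', 'o'], rfl⟩ hion, hb]
        simp [bucTryRules, hion]
      rw [if_neg hion]
      by_cases hory : PySem.Chars.endswith cs ['o', 'r', 'y'] = true
      · have hb : PySem.Dict.getD bucDispatch 'y' [] = [(false, ['l', 'y'], ['l', 'y']), (false, ['o', 'r', 'y'], ['o', 'r', 'y'])] := by decide
        rw [if_pos hory, last_of_E cs ['o', 'r', 'y'] 'y' hpre ⟨['o', 'r'], rfl⟩ hory, hb]
        simp [bucTryRules, hly, hory]
      rw [if_neg hory]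
      by_cases hun : PySem.Chars.startswith cs ['u', 'n'] = true
      · rw [if_pos hun]
        by_cases hl : PySem.List.pyGetD cs ((cs.length : Int) - 1) ' ' = 'l'
        · have hb : PySem.Dict.getD bucDispatch 'l' [] = [(true, ['u', 'n'], ['u', 'n']), (false, ['a', 'l'], ['a', 'l'])] := by decide
          rw [hl, hb]
          simp [bucTryRules, hun]
        · have hal' : ¬ PySem.Chars.endswith cs ['a', 'l'] = true :=
            fun h => hl (last_of_E cs ['a', 'l'] 'l' hpre ⟨['a'], rfl⟩ h)
          rw [tryRules_none cs uk _ hing hed hly hs hest her hion hory hal' (Or.inr hl)]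
          rw [if_pos hun]
          simp
      rw [if_neg hun]
      by_cases hal : PySem.Chars.endswith cs ['a', 'l'] = true
      · have hb : PySem.Dict.getD bucDispatch 'l' [] = [(true, ['u', 'n'], ['u', 'n']), (false, ['a', 'l'], ['a', 'l'])] := by decide
        rw [if_pos hal, last_of_E cs ['a', 'l'] 'l' hpre ⟨['a'], rfl⟩ hal, hb]
        simp [bucTryRules, hun, hal]
      rw [if_neg hal]
      rw [tryRules_none cs uk _ hing hed hly hs hest her hion hory hal (Or.inl hun)]
      rw [if_neg hun, scan_eq_find]
      rfl
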